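-- pv_equiv track=rewrite | github.com/Kuhron/programming | Paradiddle.py | digits_have_same_pattern_polarity
-- ===== SOURCE A (Python) =====
-- def digits_have_same_pattern_polarity(digs1, digs2, base_pattern):
--     # know the changes are occurring at the right edge because digs is big-endian
--     # find the prefix in the DIGITS (not the bits) that hasn't changed and ignore it
--     # remember that different digits can lead to the same bits because base_pattern has various 0s and 1s
--     n = max(len(digs1), len(digs2))
--     digs1 = [0] * (n - len(digs1)) + digs1
--     digs2 = [0] * (n - len(digs2)) + digs2
--     first_disagreement_index = None
--     for i in range(n):
--         d1 = digs1[i]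
--         d2 = digs2[i]
--         if d1 != d2:
--             first_disagreement_index = i
--             break
--     if first_disagreement_index is None:
--         # the digs are the same
--         return True
--     else:
--         # check the polarity of the rest of them
--         p1 = get_pattern_polarity(digs1[first_disagreement_index:], base_pattern)
--         p2 = get_pattern_polarity(digs2[first_disagreement_index:], base_pattern)
--         return p1 == p2
--
-- def get_pattern_polarity(digs, base_pattern):
--     # each 1 at a fractal level that we're in says to flip polarity
--     # (also why we start the base pattern at 0 not 1, so all points in time have digit sequence with infinite leading 0s rather than leading 1s)
--     return sum(base_pattern[i] for i in digs) % 2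
-- ===== SOURCE B (Python) =====
-- def digits_have_same_pattern_polarity(digs1, digs2, base_pattern):
--     # The two polarities agree iff the total bit-flip count over both sequences
--     # is even: the shared prefix contributes twice (hence evenly), so no padding
--     # lists, no first-disagreement scan and no slicing are needed.  Padding the
--     # shorter list with leading zeros adds |len1-len2| copies of base_pattern[0],
--     # which we account for arithmetically.
--     total = sum(base_pattern[d] for d in digs1) + sum(base_pattern[d] for d in digs2)
--     if len(digs1) != len(digs2):
--         total += abs(len(digs1) - len(digs2)) * base_pattern[0]
--     return total % 2 == 0
-- ===== Notes on version B (the rewrite author's own statement) =====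
-- stated objective: alternative
-- what changed: B replaces A's pad-scan-slice pipeline (build two padded lists, find the first disagreement, compare polarities of the two suffixes) by a single arithmetic criterion: the sum of both sequences' flip contributions plus |len1-len2|*base_pattern[0] for the implicit leading zeros is even iff the polarities agree, since the shared prefix contributes twice.
-- outside the precondition, e.g. on digits_have_same_pattern_polarity([5], [5], [1]): A returns True, B raises IndexError
import Mathlib
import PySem

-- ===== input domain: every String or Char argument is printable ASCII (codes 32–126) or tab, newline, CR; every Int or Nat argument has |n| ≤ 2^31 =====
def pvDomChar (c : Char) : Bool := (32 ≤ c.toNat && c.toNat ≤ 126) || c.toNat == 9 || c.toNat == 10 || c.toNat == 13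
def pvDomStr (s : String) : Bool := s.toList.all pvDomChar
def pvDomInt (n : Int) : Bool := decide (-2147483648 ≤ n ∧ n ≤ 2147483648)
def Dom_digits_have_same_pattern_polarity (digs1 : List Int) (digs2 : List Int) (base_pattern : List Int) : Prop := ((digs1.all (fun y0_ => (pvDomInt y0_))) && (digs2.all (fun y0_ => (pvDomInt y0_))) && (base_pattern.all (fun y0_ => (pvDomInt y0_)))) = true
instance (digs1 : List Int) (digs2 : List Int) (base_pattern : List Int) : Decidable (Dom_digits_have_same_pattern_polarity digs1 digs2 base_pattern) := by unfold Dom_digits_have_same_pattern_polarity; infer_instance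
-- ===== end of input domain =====

-- B replaces A's pad/first-disagreement-scan/suffix-slice pipeline by one arithmetic criterion:
-- the combined flip count of both sequences (plus the implicit leading zeros' contribution,
-- accounted arithmetically) is even iff the two polarities agree (objective: alternative).

-- ===== PORT A =====

-- sum(base_pattern[i] for i in digs) % 2; none = IndexError
def pvSumGet (base_pattern : List Int) (digs : List Int) : Option Int :=
  digs.foldl (fun acc d =>
    match acc, PySem.List.pyGet? base_pattern d with
    | some s, some v => some (s + v)
    | _, _ => none) (some 0)

def get_pattern_polarity (digs : List Int) (base_pattern : List Int) : Option Int :=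
  (pvSumGet base_pattern digs).map (fun s => PySem.Int.mod s 2)

-- the for-loop with break: index of the first disagreement
def pvFirstDisagree : List Int → List Int → Nat → Option Nat
  | a :: as, b :: bs, i => if a ≠ b then some i else pvFirstDisagree as bs (i + 1)
  | _, _, _ => none

def digits_have_same_pattern_polarity (digs1 : List Int) (digs2 : List Int) (base_pattern : List Int) : Bool :=
  let n := max digs1.length digs2.length
  let p1 := List.replicate (n - digs1.length) 0 ++ digs1
  let p2 := List.replicate (n - digs2.length) 0 ++ digs2
  match pvFirstDisagree p1 p2 0 with
  | none => true
  | some i =>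
    -- digs[i:] with 0 ≤ i is List.drop i
    match get_pattern_polarity (p1.drop i) base_pattern,
          get_pattern_polarity (p2.drop i) base_pattern with
    | some q1, some q2 => q1 == q2
    | _, _ => false   -- IndexError in Python; excluded by Pre_

-- ===== PORT B =====

-- sum(base_pattern[d] for d in l) by structural recursion; none = IndexError
def pvSumB (base_pattern : List Int) : List Int → Option Int
  | [] => some 0
  | d :: ds =>
    match PySem.List.pyGet? base_pattern d, pvSumB base_pattern ds with
    | some v, some s => some (v + s)
    | _, _ => none

def digits_have_same_pattern_polarity_alt (digs1 : List Int) (digs2 : List Int) (base_pattern : List Int) : Bool :=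
  match pvSumB base_pattern digs1, pvSumB base_pattern digs2 with
  | some s1, some s2 =>
    if digs1.length = digs2.length then
      PySem.Int.mod (s1 + s2) 2 == 0
    else
      -- total += abs(len1 - len2) * base_pattern[0]
      match PySem.List.pyGet? base_pattern 0 with
      | some v =>
        PySem.Int.mod (s1 + s2 + (((digs1.length : Int) - (digs2.length : Int)).natAbs : Int) * v) 2 == 0
      | none => false   -- IndexError in Python; excluded by Pre_
  | _, _ => false       -- IndexError in Python; excluded by Pre_

-- ===== PRECONDITION & SPEC =====
-- Pre_ excludes inputs where some digit (or, when padding occurs, the padding digit 0) is not a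
-- valid Python index into base_pattern: A raises IndexError when such a digit lies in the differing
-- suffix, and B raises IndexError whenever such a digit occurs anywhere; the only inputs A still
-- returns on that are excluded are those whose out-of-range digits all lie in the common prefix
-- (including the two lists being equal), where B naturally raises.
def Pre_digits_have_same_pattern_polarity (digs1 : List Int) (digs2 : List Int) (base_pattern : List Int) : Prop :=
  (∀ d ∈ digs1, PySem.Raise.InRange base_pattern.length d) ∧
  (∀ d ∈ digs2, PySem.Raise.InRange base_pattern.length d) ∧
  (digs1.length ≠ digs2.length → base_pattern ≠ [])
instance (digs1 : List Int) (digs2 : List Int) (base_pattern : List Int) : Decidable (Pre_digits_have_same_pattern_polarity digs1 digs2 base_pattern) := by unfold Pre_digits_have_same_pattern_polarity; infer_instance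

def pvWitness_digits_have_same_pattern_polarity : List Int × List Int × List Int := ([1, 0], [2], [0, 1, 1])

def Spec_digits_have_same_pattern_polarity (digs1 : List Int) (digs2 : List Int) (base_pattern : List Int) (out : Bool) : Prop := out = digits_have_same_pattern_polarity_alt digs1 digs2 base_pattern
instance (digs1 : List Int) (digs2 : List Int) (base_pattern : List Int) (out : Bool) : Decidable (Spec_digits_have_same_pattern_polarity digs1 digs2 base_pattern out) := by unfold Spec_digits_have_same_pattern_polarity; infer_instance

-- ===== CLAIM (what is proved, stated in full; the proofs are below) =====
def Claim_equal_digits_have_same_pattern_polarity : Prop := ∀ (digs1 : List Int) (digs2 : List Int) (base_pattern : List Int), Dom_digits_have_same_pattern_polarity digs1 digs2 base_pattern → Pre_digits_have_same_pattern_polarity digs1 digs2 base_pattern → Spec_digits_have_same_pattern_polarity digs1 digs2 base_pattern (digits_have_same_pattern_polarity digs1 digs2 base_pattern)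

-- ===== LEMMAS AND PROOFS =====

theorem get_pattern_polarity_eq (digs bp : List Int) :
    get_pattern_polarity digs bp = (pvSumGet bp digs).map (fun s => PySem.Int.mod s 2) := rfl

theorem pvSum_none (bp : List Int) (l : List Int) :
    l.foldl (fun acc d =>
      match acc, PySem.List.pyGet? bp d with
      | some s, some v => some (s + v)
      | _, _ => none) (none : Option Int) = none := by
  induction l with
  | nil => rfl
  | cons a as ih => simp only [List.foldl]; cases PySem.List.pyGet? bp a <;> exact ih

theorem pvSum_shift (bp : List Int) (l : List Int) (s : Int) :
    l.foldl (fun acc d =>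
      match acc, PySem.List.pyGet? bp d with
      | some s, some v => some (s + v)
      | _, _ => none) (some s)
    = (pvSumGet bp l).map (fun t => s + t) := by
  induction l generalizing s with
  | nil => simp [pvSumGet]
  | cons a as ih =>
    simp only [pvSumGet, List.foldl]
    cases h : PySem.List.pyGet? bp a with
    | none => simp [pvSum_none]
    | some v =>
      simp only
      rw [ih, ih]
      cases pvSumGet bp as with
      | none => rfl
      | some t => simp; ring

-- pvSumGet on a cons
theorem pvSumGet_cons (bp : List Int) (a : Int) (as : List Int) :
    pvSumGet bp (a :: as)
    = match PySem.List.pyGet? bp a with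
      | none => none
      | some v => (pvSumGet bp as).map (fun t => v + t) := by
  unfold pvSumGet
  rw [List.foldl_cons]
  cases h : PySem.List.pyGet? bp a with
  | none => exact pvSum_none bp as
  | some v =>
    have hinit : (match (some 0 : Option Int), (some v : Option Int) with
        | some s, some v => some (s + v)
        | _, _ => (none : Option Int)) = some (0 + v) := rfl
    rw [hinit, pvSum_shift]
    show Option.map (fun t => 0 + v + t) (pvSumGet bp as)
      = Option.map (fun t => v + t) (pvSumGet bp as)
    cases pvSumGet bp as with
    | none => rfl
    | some t => simp

-- B's recursive sum computes the same optional sum as A's fold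
theorem pvSumB_eq (bp : List Int) (l : List Int) : pvSumB bp l = pvSumGet bp l := by
  induction l with
  | nil => rfl
  | cons a as ih =>
    simp only [pvSumB, ih, pvSumGet_cons]
    cases h : PySem.List.pyGet? bp a with
    | none => rfl
    | some v => cases pvSumGet bp as <;> rfl

theorem pvSum_some_of_inrange (bp : List Int) (l : List Int)
    (h : ∀ d ∈ l, PySem.Raise.InRange bp.length d) :
    ∃ t, pvSumGet bp l = some t := by
  induction l with
  | nil => exact ⟨0, rfl⟩
  | cons a as ih =>
    obtain ⟨t, ht⟩ := ih (fun d hd => h d (List.mem_cons_of_mem _ hd))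
    cases hv : PySem.List.pyGet? bp a with
    | none =>
      exact absurd (h a List.mem_cons_self)
        (by simpa [PySem.List.pyGet?_eq_none_iff] using hv)
    | some v =>
      refine ⟨v + t, ?_⟩
      simp only [pvSumGet, List.foldl, hv]
      rw [pvSum_shift, show pvSumGet bp as = some t from ht]
      simp [add_comm]

theorem pvSum_append (bp : List Int) (l1 l2 : List Int) (s t : Int)
    (h1 : pvSumGet bp l1 = some s) (h2 : pvSumGet bp l2 = some t) :
    pvSumGet bp (l1 ++ l2) = some (s + t) := by
  unfold pvSumGet at h1 ⊢
  rw [List.foldl_append, h1, pvSum_shift, h2]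
  rfl

-- sum over k leading zeros, when base_pattern[0] = v
theorem pvSum_replicate (bp : List Int) (k : Nat) (v : Int)
    (hv : PySem.List.pyGet? bp 0 = some v) :
    pvSumGet bp (List.replicate k 0) = some (k * v) := by
  induction k with
  | zero => simp [pvSumGet]
  | succ m ih =>
    rw [List.replicate_succ]
    have := pvSum_append bp [0] (List.replicate m 0) v (m * v)
      (by simp [pvSumGet, List.foldl, hv]) ih
    simpa [add_mul, add_comm] using this

theorem pvFirstDisagree_none_eq (l1 l2 : List Int) (k : Nat)
    (hlen : l1.length = l2.length)
    (h : pvFirstDisagree l1 l2 k = none) : l1 = l2 := by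
  induction l1 generalizing l2 k with
  | nil => cases l2 with
    | nil => rfl
    | cons b bs => simp at hlen
  | cons a as ih =>
    cases l2 with
    | nil => simp at hlen
    | cons b bs =>
      simp only [pvFirstDisagree] at h
      by_cases hab : a = b
      · subst hab
        simp only [ne_eq, not_true_eq_false, if_false] at h
        exact congrArg (a :: ·) (ih bs (k + 1) (by simpa using hlen) h)
      · simp [hab] at h

theorem pvFirstDisagree_some_prefix (l1 l2 : List Int) (k i : Nat)
    (h : pvFirstDisagree l1 l2 k = some i) :
    k ≤ i ∧ l1.take (i - k) = l2.take (i - k) := by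
  induction l1 generalizing l2 k with
  | nil => cases l2 <;> simp [pvFirstDisagree] at h
  | cons a as ih =>
    cases l2 with
    | nil => simp [pvFirstDisagree] at h
    | cons b bs =>
      simp only [pvFirstDisagree] at h
      by_cases hab : a = b
      · subst hab
        simp only [ne_eq, not_true_eq_false, if_false] at h
        obtain ⟨hk, hpre⟩ := ih bs (k + 1) h
        refine ⟨by omega, ?_⟩
        have : i - k = (i - (k + 1)) + 1 := by omega
        rw [this]
        simp [List.take_succ_cons, hpre]
      · simp only [ne_eq, hab, not_false_iff, if_true, Option.some.injEq] at h
        subst h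
        simp

-- parity of the two suffix sums agree iff the shifted full sums have even total
theorem pvParity_shift (s t1 t2 : Int) :
    ((PySem.Int.mod t1 2 == PySem.Int.mod t2 2) : Bool)
    = ((PySem.Int.mod ((s + t1) + (s + t2)) 2 == 0) : Bool) := by
  rw [PySem.Int.mod_eq_emod_of_pos (by norm_num), PySem.Int.mod_eq_emod_of_pos (by norm_num),
      PySem.Int.mod_eq_emod_of_pos (by norm_num)]
  by_cases h : t1 % 2 = t2 % 2
  · have : (s + t1 + (s + t2)) % 2 = 0 := by omega
    simp [h, this]
  · have : (s + t1 + (s + t2)) % 2 ≠ 0 := by omega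
    simp [h, this]

-- the heart: A's scan-and-slice result = evenness of the combined full sum
theorem pvCore (bp p1 p2 : List Int)
    (hin1 : ∀ d ∈ p1, PySem.Raise.InRange bp.length d)
    (hin2 : ∀ d ∈ p2, PySem.Raise.InRange bp.length d)
    (hlen : p1.length = p2.length) :
    (match pvFirstDisagree p1 p2 0 with
     | none => true
     | some i =>
       match get_pattern_polarity (p1.drop i) bp, get_pattern_polarity (p2.drop i) bp with
       | some q1, some q2 => q1 == q2
       | _, _ => false)
    = (match pvSumGet bp p1, pvSumGet bp p2 with
       | some u1, some u2 => ((PySem.Int.mod (u1 + u2) 2 == 0) : Bool)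
       | _, _ => false) := by
  obtain ⟨u1, hu1⟩ := pvSum_some_of_inrange bp p1 hin1
  cases hfd : pvFirstDisagree p1 p2 0 with
  | none =>
    have heq : p1 = p2 := pvFirstDisagree_none_eq p1 p2 0 hlen hfd
    subst heq
    rw [hu1]
    simp only
    have : PySem.Int.mod (u1 + u1) 2 = 0 := by
      rw [PySem.Int.mod_eq_emod_of_pos (by norm_num)]; omega
    rw [this]
    decide
  | some i =>
    obtain ⟨-, hpre⟩ := pvFirstDisagree_some_prefix p1 p2 0 i hfd
    simp only [Nat.sub_zero] at hpre
    obtain ⟨s, hs⟩ := pvSum_some_of_inrange bp (p1.take i)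
      (fun d hd => hin1 d (List.mem_of_mem_take hd))
    obtain ⟨t1, ht1⟩ := pvSum_some_of_inrange bp (p1.drop i)
      (fun d hd => hin1 d (List.mem_of_mem_drop hd))
    obtain ⟨t2, ht2⟩ := pvSum_some_of_inrange bp (p2.drop i)
      (fun d hd => hin2 d (List.mem_of_mem_drop hd))
    have hu1' : pvSumGet bp p1 = some (s + t1) := by
      conv_lhs => rw [← List.take_append_drop i p1]
      exact pvSum_append _ _ _ _ _ hs ht1
    have hu2' : pvSumGet bp p2 = some (s + t2) := by
      conv_lhs => rw [← List.take_append_drop i p2]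
      exact pvSum_append _ _ _ _ _ (by rw [← hpre]; exact hs) ht2
    dsimp only
    rw [get_pattern_polarity_eq, get_pattern_polarity_eq, ht1, ht2, hu1', hu2']
    exact pvParity_shift s t1 t2

theorem digits_spec_main (digs1 digs2 base_pattern : List Int)
    (hpre : Pre_digits_have_same_pattern_polarity digs1 digs2 base_pattern) :
    digits_have_same_pattern_polarity digs1 digs2 base_pattern
    = digits_have_same_pattern_polarity_alt digs1 digs2 base_pattern := by
  obtain ⟨h1, h2, h3⟩ := hpre
  obtain ⟨s1, hs1⟩ := pvSum_some_of_inrange base_pattern digs1 h1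
  obtain ⟨s2, hs2⟩ := pvSum_some_of_inrange base_pattern digs2 h2
  by_cases hlen : digs1.length = digs2.length
  · -- no padding at all: max - len = 0 on both sides
    have hA := pvCore base_pattern digs1 digs2 h1 h2 hlen
    have e1 : max digs1.length digs2.length - digs1.length = 0 := by omega
    have e2 : max digs1.length digs2.length - digs2.length = 0 := by omega
    simp only [digits_have_same_pattern_polarity, digits_have_same_pattern_polarity_alt,
      pvSumB_eq, e1, e2, List.replicate_zero, List.nil_append, if_pos hlen]
    rw [hA, hs1, hs2]
  · -- padding occurs: base_pattern is nonempty, base_pattern[0] exists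
    have hbpne : base_pattern ≠ [] := h3 hlen
    have hbppos : 0 < base_pattern.length := List.length_pos_iff.mpr hbpne
    obtain ⟨v, hv⟩ : ∃ v, PySem.List.pyGet? base_pattern 0 = some v := by
      cases hg : PySem.List.pyGet? base_pattern (0 : Int) with
      | none =>
        exact absurd (show PySem.Raise.InRange base_pattern.length 0 from
          ⟨by omega, by exact_mod_cast hbppos⟩)
          (by simpa [PySem.List.pyGet?_eq_none_iff] using hg)
      | some v => exact ⟨v, rfl⟩
    have hin0 : PySem.Raise.InRange base_pattern.length 0 := ⟨by omega, by exact_mod_cast hbppos⟩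
    have hin1 : ∀ d ∈ List.replicate (max digs1.length digs2.length - digs1.length) (0:Int) ++ digs1,
        PySem.Raise.InRange base_pattern.length d := by
      intro d hd
      rcases List.mem_append.mp hd with hd | hd
      · rw [List.eq_of_mem_replicate hd]; exact hin0
      · exact h1 d hd
    have hin2 : ∀ d ∈ List.replicate (max digs1.length digs2.length - digs2.length) (0:Int) ++ digs2,
        PySem.Raise.InRange base_pattern.length d := by
      intro d hd
      rcases List.mem_append.mp hd with hd | hd
      · rw [List.eq_of_mem_replicate hd]; exact hin0
      · exact h2 d hd
    have hplen : (List.replicate (max digs1.length digs2.length - digs1.length) (0:Int) ++ digs1).length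
        = (List.replicate (max digs1.length digs2.length - digs2.length) (0:Int) ++ digs2).length := by
      simp only [List.length_append, List.length_replicate]; omega
    have hA := pvCore base_pattern _ _ hin1 hin2 hplen
    have hu1 : pvSumGet base_pattern
        (List.replicate (max digs1.length digs2.length - digs1.length) (0:Int) ++ digs1)
        = some (((max digs1.length digs2.length - digs1.length : Nat) : Int) * v + s1) :=
      pvSum_append _ _ _ _ _ (pvSum_replicate _ _ _ hv) hs1
    have hu2 : pvSumGet base_pattern
        (List.replicate (max digs1.length digs2.length - digs2.length) (0:Int) ++ digs2)
        = some (((max digs1.length digs2.length - digs2.length : Nat) : Int) * v + s2) :=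
      pvSum_append _ _ _ _ _ (pvSum_replicate _ _ _ hv) hs2
    have hk : ((max digs1.length digs2.length - digs1.length : Nat) : Int)
        + ((max digs1.length digs2.length - digs2.length : Nat) : Int)
        = (((digs1.length : Int) - (digs2.length : Int)).natAbs : Int) := by omega
    have harg : (((max digs1.length digs2.length - digs1.length : Nat) : Int) * v + s1)
        + (((max digs1.length digs2.length - digs2.length : Nat) : Int) * v + s2)
        = s1 + s2 + (((digs1.length : Int) - (digs2.length : Int)).natAbs : Int) * v := by
      rw [← hk]; ring
    simp only [digits_have_same_pattern_polarity, digits_have_same_pattern_polarity_alt,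
      pvSumB_eq, if_neg hlen, hv]
    rw [hA, hu1, hu2, hs1, hs2]
    simp only
    rw [harg]

-- ===== VERDICT (by name: the statement is the Claim_ definition above) =====
theorem digits_have_same_pattern_polarity_spec : Claim_equal_digits_have_same_pattern_polarity := by
  intro digs1 digs2 base_pattern _ hpre
  unfold Spec_digits_have_same_pattern_polarity
  exact digits_spec_main digs1 digs2 base_pattern hpre
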